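-- pv_equiv track=rewrite | github.com/mo-nathan/boxes | board.py | score_pairs
-- ===== SOURCE A (Python) =====
-- def score_pairs(row):
--     result = 0
--     prev = row[0]
--     for element in row[1:]:
--         if prev == element:
--             result += element * 4
--         prev = element
--     return result
-- ===== SOURCE B (Python) =====
-- def score_pairs(row):
--     # run-length decomposition: a maximal run of a value v spanning indices
--     # i..j-1 contributes (j - i - 1) * v * 4 (one score per adjacent equal pair)
--     result = 0
--     n = len(row)
--     i = 0
--     while i < n:
--         v = row[i]
--         j = i + 1
--         while j < n and row[j] == v:
--             j += 1
--         result += (j - i - 1) * v * 4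
--         i = j
--     return result
-- ===== Notes on version B (the rewrite author's own statement) =====
-- stated objective: alternative
-- what changed: Replaces the adjacent-pair prev/element scan with a run-length decomposition: an inner loop finds each maximal run of equal values and its span contributes span-minus-one times the value times 4.
-- outside the precondition, e.g. on score_pairs([]): A raises IndexError, B returns 0
import Mathlib
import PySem

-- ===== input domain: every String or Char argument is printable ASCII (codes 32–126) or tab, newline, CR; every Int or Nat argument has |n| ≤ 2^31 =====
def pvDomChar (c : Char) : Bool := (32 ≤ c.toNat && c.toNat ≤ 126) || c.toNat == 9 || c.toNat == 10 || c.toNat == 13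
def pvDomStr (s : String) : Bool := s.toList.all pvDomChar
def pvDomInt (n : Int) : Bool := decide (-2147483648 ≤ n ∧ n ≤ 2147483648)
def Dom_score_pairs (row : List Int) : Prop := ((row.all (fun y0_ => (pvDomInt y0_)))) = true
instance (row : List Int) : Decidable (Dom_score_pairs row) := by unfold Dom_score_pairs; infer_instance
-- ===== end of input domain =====

-- B replaces A's adjacent-pair scan with a run-length decomposition; return-value equivalence on non-empty rows.

-- ===== PORT A =====
-- A: prev = first element (IndexError on the empty list), then fold over the tail carrying (result, prev)
def score_pairs (row : List Int) : Int :=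
  match row with
  | [] => 0  -- unreachable under Pre_: Python raises IndexError at the initial subscript
  | p :: rest =>
    (rest.foldl (fun (s : Int × Int) e =>
      (if s.2 == e then s.1 + e * 4 else s.1, e)) (0, p)).1

-- ===== PORT B =====
-- takeRun v xs: length of the leading run of v in xs, and the remainder (B's inner while loop)
def takeRun (v : Int) : List Int → Nat × List Int
  | [] => (0, [])
  | x :: xs => if x == v then ((takeRun v xs).1 + 1, (takeRun v xs).2) else (0, x :: xs)

-- B's outer while loop: peel one maximal run per step (fuel = length bound, never exhausted)
def altGo : Nat → List Int → Int
  | _, [] => 0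
  | 0, _ :: _ => 0  -- unreachable: fuel ≥ length and takeRun never grows the remainder
  | n + 1, v :: xs => ((takeRun v xs).1 : Int) * v * 4 + altGo n (takeRun v xs).2

def score_pairs_alt (row : List Int) : Int := altGo row.length row

-- ===== PRECONDITION & SPEC =====
-- Pre_ excludes exactly the empty list, on which A raises IndexError at its initial subscript (B returns 0 there).
def Pre_score_pairs (row : List Int) : Prop := row ≠ []
instance (row : List Int) : Decidable (Pre_score_pairs row) := by unfold Pre_score_pairs; infer_instance
def pvWitness_score_pairs : List Int := [2, 2, 3]

def Spec_score_pairs (row : List Int) (out : Int) : Prop := out = score_pairs_alt row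
instance (row : List Int) (out : Int) : Decidable (Spec_score_pairs row out) := by unfold Spec_score_pairs; infer_instance

-- ===== CLAIM =====
def Claim_equal_score_pairs : Prop := ∀ (row : List Int), Dom_score_pairs row → Pre_score_pairs row → Spec_score_pairs row (score_pairs row)

-- ===== LEMMAS AND PROOFS =====

-- Accumulator-free form of A's inner scan: pairScore p l = score of l's pairs seen after prev = p
def pairScore : Int → List Int → Int
  | _, [] => 0
  | p, e :: l => (if p == e then e * 4 else 0) + pairScore e l

theorem foldl_eq_pairScore (l : List Int) (acc p : Int) :
    (l.foldl (fun (s : Int × Int) e =>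
      (if s.2 == e then s.1 + e * 4 else s.1, e)) (acc, p)).1 = acc + pairScore p l := by
  induction l generalizing acc p with
  | nil => simp [pairScore]
  | cons e l ih =>
    simp only [List.foldl, pairScore]
    split <;> rw [ih] <;> ring

theorem takeRun_len (v : Int) (xs : List Int) : (takeRun v xs).2.length ≤ xs.length := by
  induction xs with
  | nil => simp [takeRun]
  | cons x xs ih =>
    simp only [takeRun]
    split
    · exact le_trans ih (Nat.le_succ _)
    · simp

-- the fuel is irrelevant as long as it bounds the length
theorem altGo_congr (n₁ n₂ : Nat) (l : List Int) (h₁ : l.length ≤ n₁) (h₂ : l.length ≤ n₂) :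
    altGo n₁ l = altGo n₂ l := by
  induction n₁ generalizing n₂ l with
  | zero =>
    match l with
    | [] => cases n₂ <;> rfl
  | succ m ih =>
    match l with
    | [] => cases n₂ <;> rfl
    | v :: xs =>
      match n₂ with
      | 0 => simp at h₂
      | k + 1 =>
        simp only [List.length_cons, Nat.add_le_add_iff_right] at h₁ h₂
        simp only [altGo]
        rw [ih k (takeRun v xs).2 (le_trans (takeRun_len v xs) h₁)
          (le_trans (takeRun_len v xs) h₂)]

theorem pairScore_eq_altGo (n : Nat) (l : List Int) (p : Int) (h : l.length ≤ n) :
    pairScore p l = ((takeRun p l).1 : Int) * p * 4 + altGo (takeRun p l).2.length (takeRun p l).2 := by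
  induction n generalizing l p with
  | zero =>
    match l with
    | [] => simp [pairScore, takeRun, altGo]
  | succ m ih =>
    match l with
    | [] => simp [pairScore, takeRun, altGo]
    | x :: xs =>
      simp only [List.length_cons, Nat.add_le_add_iff_right] at h
      by_cases hx : (x == p) = true
      · have hxp : x = p := beq_iff_eq.mp hx
        subst hxp
        simp only [pairScore, takeRun, beq_self_eq_true, if_true]
        rw [ih xs x h]
        push_cast
        ring
      · have hx' : (x == p) = false := Bool.eq_false_iff.mpr hx
        have hpx : (p == x) = false := by
          rw [beq_eq_false_iff_ne]
          intro hq
          exact hx (beq_iff_eq.mpr hq.symm)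
        simp only [pairScore, takeRun, hpx, hx', Bool.false_eq_true, if_false,
          Nat.cast_zero, zero_mul, zero_add]
        rw [ih xs x h]
        rw [altGo_congr (takeRun x xs).2.length (x :: xs).length.pred (takeRun x xs).2 le_rfl
          (le_trans (takeRun_len x xs) (Nat.le_refl _))]
        simp only [altGo, List.length_cons, Nat.pred_succ]

-- ===== VERDICT =====
theorem score_pairs_spec : Claim_equal_score_pairs := by
  intro row _ hpre
  unfold Spec_score_pairs
  match row with
  | [] => exact absurd rfl hpre
  | p :: rest =>
    show (rest.foldl _ (0, p)).1 = altGo (p :: rest).length (p :: rest)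
    rw [foldl_eq_pairScore, zero_add]
    simp only [List.length_cons, altGo]
    rw [altGo_congr rest.length (takeRun p rest).2.length (takeRun p rest).2 (takeRun_len p rest) le_rfl]
    exact pairScore_eq_altGo rest.length rest p le_rfl
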